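-- pv_equiv track=rewrite | github.com/KrasimirKovachki/ISU | isu_parser/pdf_scores.py | _marker_tokens_from_code
-- ===== SOURCE A (Python) =====
-- def _marker_tokens_from_code(element_code: str) -> list[str]:
--     markers: list[str] = []
--     for part in element_code.split("+"):
--         if "!" in part:
--             _append_unique(markers, "!")
--         if "<<" in part:
--             _append_unique(markers, "<<")
--         elif "<" in part:
--             _append_unique(markers, "<")
--         if part.endswith("q"):
--             _append_unique(markers, "q")
--         if part.endswith("e"):
--             _append_unique(markers, "e")
--         if part.endswith("b"):
--             _append_unique(markers, "b")
--         if "*" in part: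
--             _append_unique(markers, "*")
--     return markers
--
-- def _append_unique(values: list[str], value: str) -> None:
--     if value not in values:
--         values.append(value)
-- ===== SOURCE B (Python) =====
-- _CHECKS = (
--     ("!",  lambda p: "!" in p),
--     ("<<", lambda p: "<<" in p),
--     ("<",  lambda p: "<" in p and "<<" not in p),
--     ("q",  lambda p: p.endswith("q")),
--     ("e",  lambda p: p.endswith("e")),
--     ("b",  lambda p: p.endswith("b")),
--     ("*",  lambda p: "*" in p),
-- )
--
--
-- def _marker_tokens_from_code(element_code: str) -> list[str]:
--     # Marker-major: for each possible marker find the first part that triggers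
--     # it, then sort the found markers by (first part index, check position).
--     parts = element_code.split("+")
--     keyed = []
--     for pos, (marker, hit) in enumerate(_CHECKS):
--         for idx, part in enumerate(parts):
--             if hit(part):
--                 keyed.append(((idx, pos), marker))
--                 break
--     keyed.sort(key=lambda kv: kv[0])
--     return [marker for _, marker in keyed]
-- ===== Notes on version B (the rewrite author's own statement) =====
-- stated objective: alternative
-- what changed: Inverts the traversal: instead of A's part-major single pass that runs all checks per part and unique-appends, B is marker-major — for each of the 7 possible markers it searches the split parts for the first one that triggers it (early break), then sorts the found markers by the key (first triggering part index, check position) and emits them; first-occurrence order is recovered by the sort, no dedup or membership test exists at all.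
import Mathlib
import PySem

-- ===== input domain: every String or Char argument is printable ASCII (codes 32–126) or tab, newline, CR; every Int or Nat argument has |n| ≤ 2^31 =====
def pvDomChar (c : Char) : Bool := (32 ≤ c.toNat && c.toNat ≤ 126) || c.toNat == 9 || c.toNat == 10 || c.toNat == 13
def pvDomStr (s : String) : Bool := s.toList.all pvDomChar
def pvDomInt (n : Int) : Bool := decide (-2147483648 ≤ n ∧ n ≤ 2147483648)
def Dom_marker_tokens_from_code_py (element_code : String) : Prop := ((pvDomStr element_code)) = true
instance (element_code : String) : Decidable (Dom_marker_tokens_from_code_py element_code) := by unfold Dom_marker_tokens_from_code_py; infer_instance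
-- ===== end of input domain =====

-- B inverts A's traversal: marker-major first-hit search per marker plus a sort by
-- (first triggering part index, check position), instead of A's part-major pass with
-- inline unique-append; alternative algorithm, same result, similar cost.


-- ===== PORT A =====
-- _append_unique: append value iff not already present
def appendUniquePy (values : List String) (value : String) : List String :=
  if values.contains value then values else values ++ [value]

-- body of A's loop for one part: the if/elif check sequence, each unique-appending
def markerStepA (markers : List String) (part : String) : List String :=
  let m1 := if PySem.Str.isIn "!" part then appendUniquePy markers "!" else markers
  let m2 := if PySem.Str.isIn "<<" part then appendUniquePy m1 "<<"
            else if PySem.Str.isIn "<" part then appendUniquePy m1 "<" else m1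
  let m3 := if PySem.Str.endswith part "q" then appendUniquePy m2 "q" else m2
  let m4 := if PySem.Str.endswith part "e" then appendUniquePy m3 "e" else m3
  let m5 := if PySem.Str.endswith part "b" then appendUniquePy m4 "b" else m4
  if PySem.Str.isIn "*" part then appendUniquePy m5 "*" else m5

def marker_tokens_from_code_py (element_code : String) : List String :=
  ((PySem.Str.split? element_code "+").getD []).foldl markerStepA []

-- ===== PORT B =====
-- the _CHECKS table: (marker, trigger predicate)
def checksB : List (String × (String → Bool)) :=
  [("!",  fun p => PySem.Str.isIn "!" p),
   ("<<", fun p => PySem.Str.isIn "<<" p),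
   ("<",  fun p => PySem.Str.isIn "<" p && !PySem.Str.isIn "<<" p),
   ("q",  fun p => PySem.Str.endswith p "q"),
   ("e",  fun p => PySem.Str.endswith p "e"),
   ("b",  fun p => PySem.Str.endswith p "b"),
   ("*",  fun p => PySem.Str.isIn "*" p)]

-- inner 'for idx, part in enumerate(parts): if hit(part): …; break' search
def firstHitIdx (hit : String → Bool) (idx : Int) : List String → Option Int
  | [] => none
  | p :: ps => if hit p then some idx else firstHitIdx hit (idx + 1) ps

-- outer 'for pos, (marker, hit) in enumerate(_CHECKS)' loop building keyed
def keyedLoop (parts : List String) (pos : Int) :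
    List (String × (String → Bool)) → List ((Int × Int) × String)
  | [] => []
  | c :: cs =>
    (match firstHitIdx c.2 0 parts with
     | some i => [((i, pos), c.1)]
     | none => []) ++ keyedLoop parts (pos + 1) cs

def marker_tokens_from_code_py_alt (element_code : String) : List String :=
  let parts := (PySem.Str.split? element_code "+").getD []
  let keyed := keyedLoop parts 0 checksB
  (PySem.List.sorted2 keyed (fun kv => kv.1.1) (fun kv => kv.1.2) false).map (fun kv => kv.2)

-- ===== PRECONDITION & SPEC =====
def Spec_marker_tokens_from_code_py (element_code : String) (out : List String) : Prop := out = marker_tokens_from_code_py_alt element_code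
instance (element_code : String) (out : List String) : Decidable (Spec_marker_tokens_from_code_py element_code out) := by unfold Spec_marker_tokens_from_code_py; infer_instance

-- ===== CLAIM (what is proved, stated in full; the proofs are below) =====
def Claim_equal_marker_tokens_from_code_py : Prop := ∀ (element_code : String), Dom_marker_tokens_from_code_py element_code → Spec_marker_tokens_from_code_py element_code (marker_tokens_from_code_py element_code)

-- ===== LEMMAS AND PROOFS =====

-- the markers, in check order
def markersL : List String := ["!", "<<", "<", "q", "e", "b", "*"]

-- trigger predicate of a marker (same lambdas as checksB)
def hitOf : String → (String → Bool)
  | "!"  => fun p => PySem.Str.isIn "!" p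
  | "<<" => fun p => PySem.Str.isIn "<<" p
  | "<"  => fun p => PySem.Str.isIn "<" p && !PySem.Str.isIn "<<" p
  | "q"  => fun p => PySem.Str.endswith p "q"
  | "e"  => fun p => PySem.Str.endswith p "e"
  | "b"  => fun p => PySem.Str.endswith p "b"
  | "*"  => fun p => PySem.Str.isIn "*" p
  | _    => fun _ => false

-- check position of a marker
def posOf : String → Int
  | "!"  => 0
  | "<<" => 1
  | "<"  => 2
  | "q"  => 3
  | "e"  => 4
  | "b"  => 5
  | "*"  => 6
  | _    => 7

-- markers emitted by one part, in check order
def emitB (p : String) : List String :=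
  (checksB.filter (fun c => c.2 p)).map (fun c => c.1)

-- first-trigger index of a marker (only used on markers that do trigger)
def nIdx (parts : List String) (m : String) : Int :=
  (firstHitIdx (hitOf m) 0 parts).getD 0

-- strict lexicographic order on (first-trigger index, check position)
def rlt (parts : List String) (a b : String) : Prop :=
  nIdx parts a < nIdx parts b ∨ (nIdx parts a = nIdx parts b ∧ posOf a < posOf b)

-- non-strict companion used in eq_of_pairwise
def rle (parts : List String) (a b : String) : Prop := ¬ rlt parts b a

-- the boolean comparison sorted2 uses, at our key functions
def ltE (kv kw : (Int × Int) × String) : Bool :=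
  decide (kv.1.1 < kw.1.1) || (!decide (kw.1.1 < kv.1.1) && decide (kv.1.2 < kw.1.2))

set_option maxHeartbeats 2000000 in
lemma A1 (acc : List String) (p : String) :
    markerStepA acc p = (emitB p).foldl PySem.Set.add acc := by
  have hape : appendUniquePy = PySem.Set.add := rfl
  simp only [markerStepA, emitB, checksB, List.filter_cons, List.filter_nil, hape]
  split_ifs <;> simp_all [List.foldl]

lemma A2 (parts : List String) :
    parts.foldl markerStepA [] = PySem.Set.ofList (parts.flatMap emitB) := by
  have h1 : parts.foldl markerStepA []
      = parts.foldl (fun acc p => (emitB p).foldl PySem.Set.add acc) [] :=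
    by apply PySem.List.foldl_congr_mem; intro acc x _; exact A1 acc x
  rw [h1]
  show _ = List.foldl PySem.Set.add PySem.Set.empty _
  rw [List.flatMap_def, List.foldl_flatten, List.foldl_map]
  rfl

lemma Emem (p m : String) : m ∈ emitB p ↔ m ∈ markersL ∧ hitOf m p = true := by
  constructor
  · intro h
    rcases List.mem_map.mp h with ⟨c, hc, rfl⟩
    rcases List.mem_filter.mp hc with ⟨hcs, hcp⟩
    fin_cases hcs <;> exact ⟨by decide, hcp⟩
  · rintro ⟨hm, hh⟩
    fin_cases hm
    · exact List.mem_map.mpr ⟨("!", fun p => PySem.Str.isIn "!" p),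
        List.mem_filter.mpr ⟨by simp [checksB], hh⟩, rfl⟩
    · exact List.mem_map.mpr ⟨("<<", fun p => PySem.Str.isIn "<<" p),
        List.mem_filter.mpr ⟨by simp [checksB], hh⟩, rfl⟩
    · exact List.mem_map.mpr ⟨("<", fun p => PySem.Str.isIn "<" p && !PySem.Str.isIn "<<" p),
        List.mem_filter.mpr ⟨by simp [checksB], hh⟩, rfl⟩
    · exact List.mem_map.mpr ⟨("q", fun p => PySem.Str.endswith p "q"),
        List.mem_filter.mpr ⟨by simp [checksB], hh⟩, rfl⟩
    · exact List.mem_map.mpr ⟨("e", fun p => PySem.Str.endswith p "e"),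
        List.mem_filter.mpr ⟨by simp [checksB], hh⟩, rfl⟩
    · exact List.mem_map.mpr ⟨("b", fun p => PySem.Str.endswith p "b"),
        List.mem_filter.mpr ⟨by simp [checksB], hh⟩, rfl⟩
    · exact List.mem_map.mpr ⟨("*", fun p => PySem.Str.isIn "*" p),
        List.mem_filter.mpr ⟨by simp [checksB], hh⟩, rfl⟩

lemma emit_pairwise_pos (p : String) : (emitB p).Pairwise (fun a b => posOf a < posOf b) := by
  have hsub : (emitB p).Sublist markersL := by
    have h1 : (checksB.filter (fun c => c.2 p)).Sublist checksB := List.filter_sublist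
    have h2 := h1.map (fun c => c.1)
    simpa [emitB, markersL, checksB] using h2
  exact List.Pairwise.sublist hsub (by decide)

lemma firstHitIdx_shift (hit : String → Bool) (i : Int) (ps : List String) :
    firstHitIdx hit i ps = (firstHitIdx hit 0 ps).map (· + i) := by
  induction ps generalizing i with
  | nil => simp [firstHitIdx]
  | cons p ps ih =>
    by_cases h : hit p
    · simp [firstHitIdx, h]
    · simp only [firstHitIdx, h, Bool.false_eq_true, if_false, zero_add]
      rw [ih (i + 1), ih 1]
      (cases firstHitIdx hit 0 ps <;> simp)
      omega

lemma firstHitIdx_isSome (hit : String → Bool) (ps : List String) :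
    (firstHitIdx hit 0 ps).isSome = ps.any hit := by
  induction ps with
  | nil => simp [firstHitIdx]
  | cons p ps ih =>
    by_cases h : hit p
    · simp [firstHitIdx, h]
    · simp only [firstHitIdx, h, Bool.false_eq_true, if_false, List.any_cons, Bool.false_or]
      rw [firstHitIdx_shift]
      cases hf : firstHitIdx hit 0 ps <;> simp_all

lemma firstHitIdx_nonneg (hit : String → Bool) (ps : List String) (j : Int)
    (h : firstHitIdx hit 0 ps = some j) : 0 ≤ j := by
  have aux : ∀ (ps : List String) (i j : Int), firstHitIdx hit i ps = some j → i ≤ j := by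
    intro ps
    induction ps with
    | nil => intro i j h; simp [firstHitIdx] at h
    | cons p ps ih =>
      intro i j h
      by_cases hp : hit p
      · simp [firstHitIdx, hp] at h; omega
      · simp only [firstHitIdx, hp, Bool.false_eq_true, if_false] at h
        have := ih (i + 1) j h; omega
  exact aux ps 0 j h

lemma foldl_add_acc (l s : List String) :
    l.foldl PySem.Set.add s = s ++ (l.foldl PySem.Set.add []).filter (fun y => !s.contains y) := by
  induction l generalizing s with
  | nil => simp
  | cons x l ih =>
    simp only [List.foldl_cons]
    rw [ih (PySem.Set.add s x), ih (PySem.Set.add [] x)]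
    have hadd0 : PySem.Set.add ([] : List String) x = [x] := by simp [PySem.Set.add]
    by_cases hx : x ∈ s
    · have hadd : PySem.Set.add s x = s := by simp [PySem.Set.add, hx]
      rw [hadd, hadd0]
      congr 1
      rw [List.filter_append]
      have h1 : List.filter (fun y => !s.contains y) [x] = [] := by simp [hx]
      rw [h1, List.nil_append, List.filter_filter]
      apply List.filter_congr
      intro y _
      by_cases hxy : y = x
      · subst hxy; simp [hx]
      · simp [hxy]
    · have hadd : PySem.Set.add s x = s ++ [x] := by simp [PySem.Set.add, hx]
      rw [hadd, hadd0, List.append_assoc]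
      congr 1
      rw [List.filter_append]
      have h1 : List.filter (fun y => !s.contains y) [x] = [x] := by simp [hx]
      rw [h1]
      congr 1
      rw [List.filter_filter]
      apply List.filter_congr
      intro y _
      simp [Bool.and_comm]

lemma ofList_eq_self_of_nodup (l : List String) (h : l.Nodup) : PySem.Set.ofList l = l := by
  induction l with
  | nil => rfl
  | cons x l ih =>
    rcases List.nodup_cons.mp h with ⟨hx, hl⟩
    have h0 : PySem.Set.ofList (x :: l) = List.foldl PySem.Set.add [x] l := by
      simp [PySem.Set.ofList, PySem.Set.empty, PySem.Set.add]
    rw [h0, foldl_add_acc]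
    have : List.foldl PySem.Set.add ([] : List String) l = l := ih hl
    rw [this]
    have : List.filter (fun y => !([x] : List String).contains y) l = l := by
      apply List.filter_eq_self.mpr
      intro a ha
      simp [List.contains_eq_mem]
      exact fun h' => hx (h' ▸ ha)
    rw [this]
    rfl

lemma nodup_emit (p : String) : (emitB p).Nodup := by
  refine (emit_pairwise_pos p).imp ?_
  intro a b hab he
  rw [he] at hab
  omega

lemma nIdx_cons_hit (m p : String) (ps : List String) (h : hitOf m p = true) :
    nIdx (p :: ps) m = 0 := by
  simp [nIdx, firstHitIdx, h]

lemma nIdx_cons_not_hit (m p : String) (ps : List String) (h : hitOf m p = false)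
    (hs : ps.any (hitOf m) = true) : nIdx (p :: ps) m = nIdx ps m + 1 := by
  rcases Option.isSome_iff_exists.mp (by rw [firstHitIdx_isSome]; exact hs) with ⟨j, hj⟩
  simp only [nIdx, firstHitIdx, h, Bool.false_eq_true, if_false, zero_add]
  rw [firstHitIdx_shift, hj]
  simp

lemma nIdx_nonneg (m : String) (ps : List String) (hs : ps.any (hitOf m) = true) :
    0 ≤ nIdx ps m := by
  rcases Option.isSome_iff_exists.mp (by rw [firstHitIdx_isSome]; exact hs) with ⟨j, hj⟩
  have := firstHitIdx_nonneg (hitOf m) ps j hj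
  simp [nIdx, hj]
  omega

lemma mem_flat_any (ps : List String) (y : String) (h : y ∈ ps.flatMap emitB) :
    y ∈ markersL ∧ ps.any (hitOf y) = true := by
  rcases List.mem_flatMap.mp h with ⟨q, hq, hyq⟩
  rcases (Emem q y).mp hyq with ⟨hm, hh⟩
  exact ⟨hm, List.any_eq_true.mpr ⟨q, hq, hh⟩⟩

lemma dedup_pairwise (parts : List String) :
    (PySem.Set.ofList (parts.flatMap emitB)).Pairwise (rlt parts) := by
  induction parts with
  | nil => simp [PySem.Set.ofList, PySem.Set.empty]
  | cons p ps ih =>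
    have hofl : PySem.Set.ofList ((p :: ps).flatMap emitB)
        = emitB p ++ (PySem.Set.ofList (ps.flatMap emitB)).filter
            (fun y => !(emitB p).contains y) := by
      show List.foldl PySem.Set.add PySem.Set.empty _ = _
      rw [List.flatMap_cons, List.foldl_append]
      have h2 : List.foldl PySem.Set.add PySem.Set.empty (emitB p) = emitB p :=
        ofList_eq_self_of_nodup _ (nodup_emit p)
      rw [h2, foldl_add_acc]
      rfl
    rw [hofl, List.pairwise_append]
    have not_hit_of_filter : ∀ y, y ∈ (PySem.Set.ofList (ps.flatMap emitB)).filter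
        (fun y => !(emitB p).contains y) →
        y ∈ markersL ∧ ps.any (hitOf y) = true ∧ hitOf y p = false := by
      intro y hy
      rcases List.mem_filter.mp hy with ⟨hy1, hy2⟩
      have hm := mem_flat_any ps y ((PySem.Set.mem_ofList _ _).mp hy1)
      refine ⟨hm.1, hm.2, ?_⟩
      by_contra hh
      have hyp : y ∈ emitB p := (Emem p y).mpr ⟨hm.1, by simpa using hh⟩
      simp [hyp] at hy2
    refine ⟨?_, ?_, ?_⟩
    · refine (emit_pairwise_pos p).imp_of_mem ?_
      intro a b ha hb hab
      have h0a := nIdx_cons_hit a p ps ((Emem p a).mp ha).2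
      have h0b := nIdx_cons_hit b p ps ((Emem p b).mp hb).2
      exact Or.inr ⟨by rw [h0a, h0b], hab⟩
    · refine (ih.filter _).imp_of_mem ?_
      intro a b ha hb hab
      rcases not_hit_of_filter a ha with ⟨_, hsa, hna⟩
      rcases not_hit_of_filter b hb with ⟨_, hsb, hnb⟩
      unfold rlt at hab ⊢
      rw [nIdx_cons_not_hit a p ps hna hsa, nIdx_cons_not_hit b p ps hnb hsb]
      omega
    · intro a ha b hb
      have h0a := nIdx_cons_hit a p ps ((Emem p a).mp ha).2
      rcases not_hit_of_filter b hb with ⟨_, hsb, hnb⟩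
      unfold rlt
      rw [h0a, nIdx_cons_not_hit b p ps hnb hsb]
      have := nIdx_nonneg b ps hsb
      omega

lemma ltE_asymm (a b : (Int × Int) × String) (h : ltE a b = true) : ltE b a = false := by
  simp only [ltE, Bool.or_eq_true, Bool.and_eq_true, Bool.not_eq_true', decide_eq_true_eq,
    decide_eq_false_iff_not, Bool.or_eq_false_iff, Bool.and_eq_false_iff,
    Bool.not_eq_false', decide_eq_true_eq] at h ⊢
  omega

lemma ltE_step (x y z : (Int × Int) × String) (h1 : ltE x y = true) (h2 : ltE z y = false) :
    ltE z x = false := by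
  simp only [ltE, Bool.or_eq_true, Bool.and_eq_true, Bool.not_eq_true', decide_eq_true_eq,
    decide_eq_false_iff_not, Bool.or_eq_false_iff, Bool.and_eq_false_iff,
    Bool.not_eq_false', decide_eq_true_eq] at h1 h2 ⊢
  omega

lemma insertBy_pairwise (x : (Int × Int) × String) (l : List ((Int × Int) × String))
    (h : l.Pairwise (fun a b => ltE b a = false)) :
    (PySem.List.insertBy ltE x l).Pairwise (fun a b => ltE b a = false) := by
  induction l with
  | nil => simp [PySem.List.insertBy]
  | cons y ys ih =>
    rcases List.pairwise_cons.mp h with ⟨hy, hys⟩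
    rw [show PySem.List.insertBy ltE x (y :: ys)
        = if ltE x y then x :: y :: ys else y :: PySem.List.insertBy ltE x ys from rfl]
    by_cases hxy : ltE x y = true
    · rw [if_pos hxy]
      refine List.pairwise_cons.mpr ⟨?_, h⟩
      intro z hz
      rcases List.mem_cons.mp hz with rfl | hz'
      · exact ltE_asymm _ _ hxy
      · exact ltE_step _ _ _ hxy (hy z hz')
    · rw [if_neg hxy]
      refine List.pairwise_cons.mpr ⟨?_, ih hys⟩
      intro z hz
      rcases (PySem.List.mem_insertBy _ _ _ _).mp hz with rfl | hz'
      · exact Bool.not_eq_true _ ▸ eq_false_of_ne_true hxy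
      · exact hy z hz'

lemma sorted2_pairwise' (xs : List ((Int × Int) × String)) :
    (PySem.List.sorted2 xs (fun kv => kv.1.1) (fun kv => kv.1.2) false).Pairwise
      (fun a b => ltE b a = false) := by
  have e : PySem.List.sorted2 xs (fun kv => kv.1.1) (fun kv => kv.1.2) false
      = xs.foldl (fun acc x => PySem.List.insertBy ltE x acc) [] := rfl
  rw [e]
  have main : ∀ (ys : List ((Int × Int) × String)) (acc : List ((Int × Int) × String)),
      acc.Pairwise (fun a b => ltE b a = false) →
      (ys.foldl (fun acc x => PySem.List.insertBy ltE x acc) acc).Pairwise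
        (fun a b => ltE b a = false) := by
    intro ys
    induction ys with
    | nil => exact fun acc h => h
    | cons x xs ih => exact fun acc h => ih _ (insertBy_pairwise x acc h)
  exact main xs [] (by simp)

lemma K1 (parts : List String) (pos : Int) (cs : List (String × (String → Bool))) :
    (keyedLoop parts pos cs).map (fun kv => kv.2)
      = (cs.filter (fun c => (firstHitIdx c.2 0 parts).isSome)).map (fun c => c.1) := by
  induction cs generalizing pos with
  | nil => simp [keyedLoop]
  | cons c cs ih =>
    cases hf : firstHitIdx c.2 0 parts <;>
      simp [keyedLoop, hf, ih]

lemma K2aux (parts : List String) (cs : List (String × (String → Bool))) :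
    ∀ (pos : Int) (kv : (Int × Int) × String), kv ∈ keyedLoop parts pos cs →
      ∃ (k : Nat) (c : String × (String → Bool)), cs[k]? = some c ∧
        kv.1.2 = pos + k ∧ kv.2 = c.1 ∧ firstHitIdx c.2 0 parts = some kv.1.1 := by
  induction cs with
  | nil => intro pos kv h; simp [keyedLoop] at h
  | cons c cs ih =>
    intro pos kv h
    rcases List.mem_append.mp (by simpa [keyedLoop] using h) with h1 | h2
    · revert h1
      cases hf : firstHitIdx c.2 0 parts with
      | none => simp
      | some i =>
        intro h1
        simp only [List.mem_singleton] at h1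
        subst h1
        exact ⟨0, c, by simp, by simp, rfl, hf⟩
    · rcases ih (pos + 1) kv h2 with ⟨k, c', hk, hpos, hsnd, hfi⟩
      exact ⟨k + 1, c', by simpa using hk, by push_cast; omega, hsnd, hfi⟩

lemma K2 (parts : List String) (kv : (Int × Int) × String)
    (h : kv ∈ keyedLoop parts 0 checksB) :
    firstHitIdx (hitOf kv.2) 0 parts = some kv.1.1 ∧ kv.1.2 = posOf kv.2 := by
  rcases K2aux parts checksB 0 kv h with ⟨k, c, hk, hpos, hsnd, hfi⟩
  have hklt : k < 7 := by
    have := List.getElem?_eq_some_iff.mp hk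
    simpa [checksB] using this.1
  interval_cases k <;>
    (simp only [checksB, List.getElem?_cons_zero, List.getElem?_cons_succ,
      Option.some.injEq] at hk
     subst hk
     rw [hsnd]
     exact ⟨hfi, by simp [posOf]; omega⟩)

lemma K3 (parts : List String) (m : String) :
    m ∈ (keyedLoop parts 0 checksB).map (fun kv => kv.2)
      ↔ m ∈ markersL ∧ parts.any (hitOf m) = true := by
  rw [K1]
  constructor
  · intro h
    rcases List.mem_map.mp h with ⟨c, hc, rfl⟩
    rcases List.mem_filter.mp hc with ⟨hcs, hsome⟩
    fin_cases hcs <;>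
      exact ⟨by decide, by rw [← firstHitIdx_isSome]; exact hsome⟩
  · rintro ⟨hm, hany⟩
    fin_cases hm
    · exact List.mem_map.mpr ⟨("!", fun p => PySem.Str.isIn "!" p),
        List.mem_filter.mpr ⟨by simp [checksB], by rw [firstHitIdx_isSome]; exact hany⟩, rfl⟩
    · exact List.mem_map.mpr ⟨("<<", fun p => PySem.Str.isIn "<<" p),
        List.mem_filter.mpr ⟨by simp [checksB], by rw [firstHitIdx_isSome]; exact hany⟩, rfl⟩
    · exact List.mem_map.mpr ⟨("<", fun p => PySem.Str.isIn "<" p && !PySem.Str.isIn "<<" p),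
        List.mem_filter.mpr ⟨by simp [checksB], by rw [firstHitIdx_isSome]; exact hany⟩, rfl⟩
    · exact List.mem_map.mpr ⟨("q", fun p => PySem.Str.endswith p "q"),
        List.mem_filter.mpr ⟨by simp [checksB], by rw [firstHitIdx_isSome]; exact hany⟩, rfl⟩
    · exact List.mem_map.mpr ⟨("e", fun p => PySem.Str.endswith p "e"),
        List.mem_filter.mpr ⟨by simp [checksB], by rw [firstHitIdx_isSome]; exact hany⟩, rfl⟩
    · exact List.mem_map.mpr ⟨("b", fun p => PySem.Str.endswith p "b"),
        List.mem_filter.mpr ⟨by simp [checksB], by rw [firstHitIdx_isSome]; exact hany⟩, rfl⟩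
    · exact List.mem_map.mpr ⟨("*", fun p => PySem.Str.isIn "*" p),
        List.mem_filter.mpr ⟨by simp [checksB], by rw [firstHitIdx_isSome]; exact hany⟩, rfl⟩

lemma K4 (parts : List String) : ((keyedLoop parts 0 checksB).map (fun kv => kv.2)).Nodup := by
  rw [K1]
  have hsub : ((checksB.filter (fun c => (firstHitIdx c.2 0 parts).isSome)).map (fun c => c.1)).Sublist
      (checksB.map (fun c => c.1)) := List.filter_sublist.map _
  have hnd : (checksB.map (fun c => c.1)).Nodup := by decide
  exact hsub.nodup hnd

lemma posOf_inj (a b : String) (ha : a ∈ markersL) (hb : b ∈ markersL)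
    (h : posOf a = posOf b) : a = b := by
  fin_cases ha <;> fin_cases hb <;> simp_all [posOf]

-- ===== VERDICT (by name: the statement is the Claim_ definition above) =====
lemma rlt_asymm (parts : List String) (a b : String) (h : rlt parts a b) : ¬ rlt parts b a := by
  unfold rlt at h ⊢
  omega

lemma main_eq (parts : List String) :
    PySem.Set.ofList (parts.flatMap emitB)
      = (PySem.List.sorted2 (keyedLoop parts 0 checksB)
          (fun kv => kv.1.1) (fun kv => kv.1.2) false).map (fun kv => kv.2) := by
  have hperm2 := PySem.List.sorted2_perm (keyedLoop parts 0 checksB)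
    (fun kv => kv.1.1) (fun kv => kv.1.2) false
  have hLmem : ∀ m, m ∈ PySem.Set.ofList (parts.flatMap emitB)
      ↔ m ∈ markersL ∧ parts.any (hitOf m) = true := by
    intro m
    rw [PySem.Set.mem_ofList]
    constructor
    · exact mem_flat_any parts m
    · rintro ⟨hm, hany⟩
      rcases List.any_eq_true.mp hany with ⟨q, hq, hh⟩
      exact List.mem_flatMap.mpr ⟨q, hq, (Emem q m).mpr ⟨hm, hh⟩⟩
  have hRmem : ∀ m, m ∈ (PySem.List.sorted2 (keyedLoop parts 0 checksB)
        (fun kv => kv.1.1) (fun kv => kv.1.2) false).map (fun kv => kv.2)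
      ↔ m ∈ markersL ∧ parts.any (hitOf m) = true := by
    intro m
    rw [(hperm2.map (fun kv => kv.2)).mem_iff]
    exact K3 parts m
  have hnodL := PySem.Set.nodup_ofList (parts.flatMap emitB)
  have hnodR : ((PySem.List.sorted2 (keyedLoop parts 0 checksB)
      (fun kv => kv.1.1) (fun kv => kv.1.2) false).map (fun kv => kv.2)).Nodup :=
    ((hperm2.map (fun kv => kv.2)).nodup_iff).mpr (K4 parts)
  have hperm : (PySem.Set.ofList (parts.flatMap emitB)).Perm
      ((PySem.List.sorted2 (keyedLoop parts 0 checksB)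
        (fun kv => kv.1.1) (fun kv => kv.1.2) false).map (fun kv => kv.2)) :=
    (List.perm_ext_iff_of_nodup hnodL hnodR).mpr (fun a => by rw [hLmem, hRmem])
  have hL : (PySem.Set.ofList (parts.flatMap emitB)).Pairwise (rle parts) :=
    (dedup_pairwise parts).imp (fun h => rlt_asymm parts _ _ h)
  have hR : ((PySem.List.sorted2 (keyedLoop parts 0 checksB)
      (fun kv => kv.1.1) (fun kv => kv.1.2) false).map (fun kv => kv.2)).Pairwise (rle parts) := by
    rw [List.pairwise_map]
    refine (sorted2_pairwise' (keyedLoop parts 0 checksB)).imp_of_mem ?_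
    intro a b ha hb hab
    have ha' : a ∈ keyedLoop parts 0 checksB := hperm2.subset ha
    have hb' : b ∈ keyedLoop parts 0 checksB := hperm2.subset hb
    rcases K2 parts a ha' with ⟨hfa, hpa⟩
    rcases K2 parts b hb' with ⟨hfb, hpb⟩
    have nA : nIdx parts a.2 = a.1.1 := by simp [nIdx, hfa]
    have nB : nIdx parts b.2 = b.1.1 := by simp [nIdx, hfb]
    intro hcon
    unfold rlt at hcon
    rw [nA, nB, ← hpa, ← hpb] at hcon
    simp only [ltE, Bool.or_eq_false_iff, Bool.and_eq_false_iff, decide_eq_false_iff_not,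
      Bool.not_eq_false', decide_eq_true_eq] at hab
    omega
  refine List.Perm.eq_of_pairwise ?_ hL hR hperm
  intro a b ha hb hab hba
  have hma := ((hLmem a).mp ha).1
  have hmb := ((hRmem b).mp hb).1
  unfold rle rlt at hab hba
  exact posOf_inj a b hma hmb (by omega)

-- ===== final assembly =====
theorem marker_tokens_from_code_py_spec : Claim_equal_marker_tokens_from_code_py := by
  intro ec _
  show marker_tokens_from_code_py ec = marker_tokens_from_code_py_alt ec
  have halt : marker_tokens_from_code_py_alt ec
      = (PySem.List.sorted2 (keyedLoop ((PySem.Str.split? ec "+").getD []) 0 checksB)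
          (fun kv => kv.1.1) (fun kv => kv.1.2) false).map (fun kv => kv.2) := rfl
  rw [halt]
  show ((PySem.Str.split? ec "+").getD []).foldl markerStepA [] = _
  rw [A2]
  exact main_eq ((PySem.Str.split? ec "+").getD [])
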